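-- pv_equiv track=rewrite | github.com/shivendratiwari3118/cvat | cvat/apps/engine/additional_views.py | nav_list
-- ===== SOURCE A (Python) =====
-- def nav_list(aa,stop_frame):
--     import math
--     try:
--         new_list = []
--         for item in aa:
--             if len(new_list) == 0:
--                 if item[1] == True:
--                     pass
--                 else:
--                     new_list.append(item)
--             else:
--                 if new_list[-1][1] == item[1]:
--                     pass
--                 else:
--                     new_list.append(item)
--         rnge_list = []
--         cnt = 0
--         for i in range(math.ceil(len(new_list)/2)):
--             try:
--                 rnge_list.append(range(new_list[cnt][0],new_list[cnt+1][0]))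
--                 cnt += 2
--             except:
--                 rnge_list.append(range(new_list[cnt][0],stop_frame))
--         return [item for sublist in rnge_list for item in sublist]
--     except:
--         return []
-- ===== SOURCE B (Python) =====
-- def nav_list(aa, stop_frame):
--     # Single pass: an open False-run starts at `start`; a True frame closes it.
--     # The outer try/except mirrors A's: any runtime failure (e.g. MemoryError
--     # while materialising a huge range) yields [].
--     try:
--         result = []
--         start = None
--         for f, v in aa:
--             if v:
--                 if start is not None:
--                     result.extend(range(start, f))
--                     start = None
--             else:
--                 if start is None:
--                     start = f
--         if start is not None:
--             result.extend(range(start, stop_frame))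
--         return result
--     except:
--         return []
-- ===== Notes on version B (the rewrite author's own statement) =====
-- stated objective: simpler
-- what changed: Replaces A's two-phase pipeline (build a transition list, then an indexed pairing loop with a counter and try/except, then flatten nested ranges) by a single-pass state machine that tracks the start of the currently open False-run and emits each range directly.
import Mathlib
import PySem

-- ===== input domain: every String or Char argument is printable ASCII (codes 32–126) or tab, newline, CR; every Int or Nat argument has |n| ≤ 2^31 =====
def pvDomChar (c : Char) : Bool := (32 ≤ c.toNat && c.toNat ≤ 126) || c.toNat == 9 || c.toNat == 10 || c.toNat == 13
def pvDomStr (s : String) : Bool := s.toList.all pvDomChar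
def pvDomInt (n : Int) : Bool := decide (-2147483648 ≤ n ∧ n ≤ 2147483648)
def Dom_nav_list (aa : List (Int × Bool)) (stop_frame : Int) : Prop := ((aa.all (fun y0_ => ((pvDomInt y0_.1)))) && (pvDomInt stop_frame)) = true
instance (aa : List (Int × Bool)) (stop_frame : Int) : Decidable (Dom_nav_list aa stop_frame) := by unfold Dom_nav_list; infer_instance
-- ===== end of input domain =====

-- B replaces A's two-phase transition-filter + indexed pairing loop by a single-pass
-- state machine (open False-run start, closed on True); same exact output.


-- ===== PORT A =====
-- first loop of A: build new_list (append on a flag transition; drop leading True items)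
def navA_step (nl : List (Int × Bool)) (item : Int × Bool) : List (Int × Bool) :=
  if nl.length = 0 then
    if item.2 = true then nl else nl ++ [item]
  else
    match PySem.List.pyGet? nl (-1) with   -- new_list[-1]
    | some last => if last.2 = item.2 then nl else nl ++ [item]
    | none => nl                            -- unreachable: nl is nonempty here

-- second loop of A: `for i in range(math.ceil(len(new_list)/2))` with counter cnt;
-- the inner try/except is the two pyGet? cases (cnt+1 out of range → stop_frame range, cnt kept)
def navA_loop (new_list : List (Int × Bool)) (stop_frame : Int) :
    Nat → List (List Int) × Nat → List (List Int) × Nat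
  | 0, p => p
  | Nat.succ k, p =>
    navA_loop new_list stop_frame k
      (match PySem.List.pyGet? new_list (p.2 : Int), PySem.List.pyGet? new_list ((p.2 : Int) + 1) with
       | some a, some b => (p.1 ++ [PySem.List.pyRange a.1 b.1 1], p.2 + 2)
       | some a, none => (p.1 ++ [PySem.List.pyRange a.1 stop_frame 1], p.2)
       | none, _ => (p.1, p.2))             -- unreachable: cnt stays < len(new_list)

def nav_list (aa : List (Int × Bool)) (stop_frame : Int) : List Int :=
  let new_list := aa.foldl navA_step []
  let rnge_list := (navA_loop new_list stop_frame ((new_list.length + 1) / 2) ([], 0)).1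
  rnge_list.flatten

-- ===== PORT B =====
-- single pass: state = (result, start of the currently open False-run, if any)
def navB_step (p : List Int × Option Int) (fv : Int × Bool) : List Int × Option Int :=
  if fv.2 then
    match p.2 with
    | some s => (p.1 ++ PySem.List.pyRange s fv.1 1, none)
    | none => p
  else
    match p.2 with
    | none => (p.1, some fv.1)
    | some _ => p

def nav_list_alt (aa : List (Int × Bool)) (stop_frame : Int) : List Int :=
  let p := aa.foldl navB_step ([], none)
  match p.2 with
  | some s => p.1 ++ PySem.List.pyRange s stop_frame 1
  | none => p.1

-- ===== PRECONDITION & SPEC =====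
def Spec_nav_list (aa : List (Int × Bool)) (stop_frame : Int) (out : List Int) : Prop := out = nav_list_alt aa stop_frame
instance (aa : List (Int × Bool)) (stop_frame : Int) (out : List Int) : Decidable (Spec_nav_list aa stop_frame out) := by unfold Spec_nav_list; infer_instance

-- ===== CLAIM (what is proved, stated in full; the proofs are below) =====
def Claim_equal_nav_list : Prop := ∀ (aa : List (Int × Bool)) (stop_frame : Int), Dom_nav_list aa stop_frame → Spec_nav_list aa stop_frame (nav_list aa stop_frame)

-- ===== LEMMAS AND PROOFS =====

-- the alternating transition list both programs are implicitly built around: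
-- `collect xs s` keeps each item whose flag differs from the currently skipped flag s
def collect : List (Int × Bool) → Bool → List (Int × Bool)
  | [], _ => []
  | (f, v) :: rest, s => if v = s then collect rest s else (f, v) :: collect rest v

-- flat range list of the alternating list: pairs give [a, b) and a trailing start gives [a, stop)
def pairFlat (stop : Int) : List (Int × Bool) → List Int
  | [] => []
  | [a] => PySem.List.pyRange a.1 stop 1
  | a :: b :: rest => PySem.List.pyRange a.1 b.1 1 ++ pairFlat stop rest

theorem pyGet?_neg_one {α : Type} (xs : List α) : PySem.List.pyGet? xs (-1) = xs.getLast? := by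
  cases xs with
  | nil => rfl
  | cons a t =>
    simp [PySem.List.pyGet?, PySem.List.pyIdx?, List.getLast?_eq_getElem?]

theorem navA_fold_collect (rest : List (Int × Bool)) :
    (List.foldl navA_step [] rest = collect rest true) ∧
    (∀ (nl : List (Int × Bool)) (last : Int × Bool), nl.getLast? = some last →
      List.foldl navA_step nl rest = nl ++ collect rest last.2) := by
  induction rest with
  | nil => exact ⟨rfl, fun nl last _ => by simp [collect]⟩
  | cons it t ih =>
    obtain ⟨f, v⟩ := it
    refine ⟨?_, ?_⟩
    · cases v with
      | true => simp [List.foldl_cons, navA_step, collect, ih.1]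
      | false =>
        have h2 := ih.2 [(f, false)] (f, false) (by simp)
        simp [List.foldl_cons, navA_step, collect, h2]
    · intro nl last hlast
      have hne : nl ≠ [] := by intro h; simp [h] at hlast
      have hlen : ¬ nl.length = 0 := by simpa [List.length_eq_zero_iff] using hne
      by_cases hv : last.2 = v
      · have h2 := ih.2 nl last hlast
        simp [List.foldl_cons, navA_step, hlen, pyGet?_neg_one, hlast, hv, collect, h2]
      · have h2 := ih.2 (nl ++ [(f, v)]) (f, v) (by simp)
        have hv' : ¬ v = last.2 := fun h => hv h.symm
        simp [List.foldl_cons, navA_step, hlen, pyGet?_neg_one, hlast, hv, hv', collect, h2]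

-- A's indexed pairing loop computes pairFlat of the suffix from the counter
theorem navA_loop_pairFlat (L : List (Int × Bool)) (stop : Int) (n : Nat) :
    ∀ (rl : List (List Int)) (c : Nat), n = (L.length - c + 1) / 2 →
    (navA_loop L stop n (rl, c)).1.flatten = rl.flatten ++ pairFlat stop (L.drop c) := by
  induction n with
  | zero =>
    intro rl c hn
    have hc : L.length ≤ c := by omega
    simp [navA_loop, List.drop_eq_nil_of_le hc, pairFlat]
  | succ k ih =>
    intro rl c hn
    have hc : c < L.length := by omega
    have hget : PySem.List.pyGet? L (c : Int) = some L[c] := by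
      rw [PySem.List.pyGet?_natCast]; simp [hc]
    by_cases hc1 : c + 1 < L.length
    · have hget1 : PySem.List.pyGet? L ((c : Int) + 1) = some L[c+1] := by
        have : ((c : Int) + 1) = ((c + 1 : Nat) : Int) := by push_cast; ring
        rw [this, PySem.List.pyGet?_natCast]; simp [hc1]
      have hdrop : L.drop c = L[c] :: L[c+1] :: L.drop (c + 2) := by
        rw [List.drop_eq_getElem_cons hc]
        congr 1
        rw [List.drop_eq_getElem_cons hc1]
      have ihk := ih (rl ++ [PySem.List.pyRange L[c].1 L[c+1].1 1]) (c + 2) (by omega)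
      simp only [navA_loop, hget, hget1]
      rw [ihk, hdrop]
      simp [pairFlat]
    · -- c is the last index: cnt+1 raises IndexError, except-branch appends range(·, stop)
      have hlast : L.length = c + 1 := by omega
      have hget1 : PySem.List.pyGet? L ((c : Int) + 1) = none := by
        have : ((c : Int) + 1) = ((c + 1 : Nat) : Int) := by push_cast; ring
        rw [this, PySem.List.pyGet?_natCast]
        simp [hlast]
      have hk : k = 0 := by omega
      have hdrop : L.drop c = [L[c]] := by
        rw [List.drop_eq_getElem_cons hc]
        simp [List.drop_eq_nil_of_le (by omega : L.length ≤ c + 1)]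
      simp only [navA_loop, hget, hget1, hk]
      rw [hdrop]
      simp [pairFlat]

-- B's single pass computes pairFlat of collect, in both states of the machine
theorem navB_fold_pairFlat (stop : Int) (rest : List (Int × Bool)) :
    (∀ (res : List Int),
      (match (List.foldl navB_step (res, none) rest).2 with
       | some s => (List.foldl navB_step (res, none) rest).1 ++ PySem.List.pyRange s stop 1
       | none => (List.foldl navB_step (res, none) rest).1)
        = res ++ pairFlat stop (collect rest true)) ∧
    (∀ (res : List Int) (st : Int),
      (match (List.foldl navB_step (res, some st) rest).2 with
       | some s => (List.foldl navB_step (res, some st) rest).1 ++ PySem.List.pyRange s stop 1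
       | none => (List.foldl navB_step (res, some st) rest).1)
        = res ++ pairFlat stop ((st, false) :: collect rest false)) := by
  induction rest with
  | nil => exact ⟨fun res => by simp [collect, pairFlat], fun res st => by simp [collect, pairFlat]⟩
  | cons it t ih =>
    obtain ⟨f, v⟩ := it
    refine ⟨?_, ?_⟩
    · intro res
      cases v with
      | true => simpa [List.foldl_cons, navB_step, collect] using ih.1 res
      | false =>
        have h2 := ih.2 res f
        simp only [List.foldl_cons, navB_step] at *
        simpa [collect] using h2
    · intro res st
      cases v with
      | true =>
        have h1 := ih.1 (res ++ PySem.List.pyRange st f 1)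
        simp only [List.foldl_cons, navB_step] at *
        cases ht : collect t true with
        | nil => simpa [collect, pairFlat, ht] using h1
        | cons b r => simpa [collect, pairFlat, ht] using h1
      | false =>
        have h2 := ih.2 res st
        simp only [List.foldl_cons, navB_step] at *
        simpa [collect] using h2

-- ===== VERDICT (by name: the statement is the Claim_ definition above) =====
theorem nav_list_spec : Claim_equal_nav_list := by
  intro aa stop_frame _
  unfold Spec_nav_list nav_list nav_list_alt
  rw [(navA_fold_collect aa).1,
      navA_loop_pairFlat (collect aa true) stop_frame _ [] 0 (by omega)]
  simpa using ((navB_fold_pairFlat stop_frame aa).1 []).symm
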